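-- pv_equiv track=rewrite | github.com/bingzhong-project/leetcode | algorithms/arithmetic-slices/src/Solution2.py | numberOfArithmeticSlices2
-- ===== SOURCE A (Python) =====
-- def numberOfArithmeticSlices2(A: 'List[int]') -> 'int':
--     dp = 0
--     res = 0
--     for i in range(2, len(A)):
--         if A[i] - A[i - 1] == A[i - 1] - A[i - 2]:
--             dp += 1
--             res += dp
--         else:
--             dp = 0
--     return res
-- ===== SOURCE B (Python) =====
-- def numberOfArithmeticSlices2(A: 'List[int]') -> 'int':
--     diffs = [b - a for a, b in zip(A, A[1:])]
--     n = len(diffs)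
--     res = 0
--     i = 0
--     while i < n:
--         j = i + 1
--         while j < n and diffs[j] == diffs[i]:
--             j += 1
--         k = j - i - 1  # number of adjacent equal-difference pairs in this maximal run
--         res += k * (k + 1) // 2
--         i = j
--     return res
-- ===== Notes on version B (the rewrite author's own statement) =====
-- stated objective: alternative
-- what changed: B builds the list of adjacent differences once, splits it into maximal runs of equal differences, and adds each run's closed-form triangular contribution (run-1)*run//2, instead of A's per-index dp accumulation.
import Mathlib
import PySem

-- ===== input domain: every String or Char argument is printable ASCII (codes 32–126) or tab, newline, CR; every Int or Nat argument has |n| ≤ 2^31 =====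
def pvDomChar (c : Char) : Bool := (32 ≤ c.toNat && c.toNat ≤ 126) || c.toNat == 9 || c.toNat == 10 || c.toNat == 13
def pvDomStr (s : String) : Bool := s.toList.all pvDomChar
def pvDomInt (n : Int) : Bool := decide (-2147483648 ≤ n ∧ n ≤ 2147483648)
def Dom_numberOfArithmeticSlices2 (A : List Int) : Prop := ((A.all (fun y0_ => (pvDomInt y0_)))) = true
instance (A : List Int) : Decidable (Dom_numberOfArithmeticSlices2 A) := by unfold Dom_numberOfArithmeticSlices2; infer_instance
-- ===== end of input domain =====

-- B re-derives the count from maximal runs of equal adjacent differences via the closed-form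
-- triangular contribution, instead of A's per-index dp accumulation; same O(n) cost ("alternative").

-- ===== PORT A =====
-- for i in range(2, len(A)): if A[i]-A[i-1] == A[i-1]-A[i-2]: dp += 1; res += dp else: dp = 0
-- (all indices are in range, so pyGetD's default is never used)
def numberOfArithmeticSlices2 (A : List Int) : Int :=
  ((PySem.List.pyRange 2 (A.length : Int) 1).foldl
    (fun (s : Int × Int) i =>
      if PySem.List.pyGetD A i 0 - PySem.List.pyGetD A (i - 1) 0 =
         PySem.List.pyGetD A (i - 1) 0 - PySem.List.pyGetD A (i - 2) 0
      then (s.1 + 1, s.2 + (s.1 + 1))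
      else (0, s.2))
    ((0 : Int), (0 : Int))).2

-- ===== PORT B =====
-- outer 'while i < n:' loop of Source B as recursion on the suffix diffs[i:]: the inner while
-- advances j over the entries equal to diffs[i], so k = j - i - 1 is the length of the equal
-- prefix of the tail (a takeWhile length), and continuing from i = j is recursing on the
-- suffix after that prefix (a drop). Exact on every input.
def pvCount : List Int → Int
  | [] => 0
  | d :: rest =>
      let k : Int := ((rest.takeWhile (fun x => x == d)).length : Int)
      PySem.Int.floordiv (k * (k + 1)) 2 +
        pvCount (rest.drop (rest.takeWhile (fun x => x == d)).length)
termination_by l => l.length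
decreasing_by
  simp only [List.length_drop, List.length_cons]
  omega

-- diffs = [b - a for a, b in zip(A, A[1:])]
def numberOfArithmeticSlices2_alt (A : List Int) : Int :=
  pvCount (List.zipWith (fun a b => b - a) A (PySem.List.slice A (some 1) none))

-- ===== PRECONDITION & SPEC =====
def Spec_numberOfArithmeticSlices2 (A : List Int) (out : Int) : Prop := out = numberOfArithmeticSlices2_alt A
instance (A : List Int) (out : Int) : Decidable (Spec_numberOfArithmeticSlices2 A out) := by unfold Spec_numberOfArithmeticSlices2; infer_instance

-- ===== CLAIM (what is proved, stated in full; the proofs are below) =====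
def Claim_equal_numberOfArithmeticSlices2 : Prop := ∀ (A : List Int), Dom_numberOfArithmeticSlices2 A → Spec_numberOfArithmeticSlices2 A (numberOfArithmeticSlices2 A)

-- ===== LEMMAS AND PROOFS =====

-- triangular numbers, recursively
def pvTri : Nat → Nat
  | 0 => 0
  | n + 1 => pvTri n + n + 1

-- A's loop, structurally on the diff list: d is the previous difference
def pvLoopD (d dp res : Int) : List Int → Int
  | [] => res
  | e :: rest => if e = d then pvLoopD e (dp + 1) (res + (dp + 1)) rest
                 else pvLoopD e 0 res rest

-- A's loop, structurally on the remaining elements: x, y are the two previous elements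
def pvLoopP (x y dp res : Int) : List Int → Int × Int
  | [] => (dp, res)
  | z :: rest => if z - y = y - x then pvLoopP y z (dp + 1) (res + (dp + 1)) rest
                 else pvLoopP y z 0 res rest

theorem pvCount_nil : pvCount [] = 0 := by rw [pvCount.eq_def]

theorem pvCount_cons (d : Int) (rest : List Int) :
    pvCount (d :: rest) =
      PySem.Int.floordiv
        ((((rest.takeWhile (fun x => x == d)).length : Nat) : Int) *
         ((((rest.takeWhile (fun x => x == d)).length : Nat) : Int) + 1)) 2 +
        pvCount (rest.drop (rest.takeWhile (fun x => x == d)).length) := by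
  rw [pvCount.eq_def]

theorem pvTri_closed (k : Nat) : pvTri k = k * (k + 1) / 2 := by
  induction k with
  | zero => rfl
  | succ k ih =>
      have hk : (k + 1) * (k + 1 + 1) = k * (k + 1) + 2 * (k + 1) := by ring
      simp only [pvTri, ih]
      omega

theorem pvTri_floordiv (k : Nat) :
    PySem.Int.floordiv ((k : Int) * ((k : Int) + 1)) 2 = (pvTri k : Int) := by
  have h1 : (k : Int) * ((k : Int) + 1) = ((k * (k + 1) : Nat) : Int) := by
    push_cast; ring
  rw [h1, PySem.Int.floordiv_eq_ediv_of_pos (by omega), pvTri_closed k]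
  exact_mod_cast (Int.natCast_div (k * (k + 1)) 2)

theorem pvLoopD_eq (D : List Int) : ∀ (d : Int) (dp : Nat) (res : Int),
    pvLoopD d (dp : Int) res D =
      res + ((pvTri (dp + (D.takeWhile (fun x => x == d)).length) : Int) - (pvTri dp : Int)) +
        pvCount (D.drop (D.takeWhile (fun x => x == d)).length) := by
  induction D with
  | nil => intro d dp res; simp [pvLoopD, pvCount_nil]
  | cons e rest ih =>
      intro d dp res
      by_cases h : e = d
      · subst h
        have hcast : (dp : Int) + 1 = ((dp + 1 : Nat) : Int) := by push_cast; ring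
        simp only [pvLoopD, List.takeWhile_cons, beq_self_eq_true, if_pos,
          List.length_cons, List.drop_succ_cons, hcast]
        rw [ih e (dp + 1) (res + ((dp + 1 : Nat) : Int))]
        have ht : pvTri (dp + ((rest.takeWhile (fun x => x == e)).length + 1)) =
            pvTri ((dp + 1) + (rest.takeWhile (fun x => x == e)).length) := by
          congr 1; omega
        have ht2 : pvTri (dp + 1) = pvTri dp + dp + 1 := rfl
        rw [ht]
        have hc2 : ((pvTri (dp + 1) : Nat) : Int) = (pvTri dp : Int) + dp + 1 := by
          rw [ht2]; push_cast; ring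
        omega
      · have hb : (e == d) = false := by simp [h]
        simp only [pvLoopD, if_neg h, List.takeWhile_cons, hb, Bool.false_eq_true, if_false,
          List.length_nil, List.drop_zero]
        rw [show (0 : Int) = ((0 : Nat) : Int) from rfl, ih e 0 res]
        show res + _ + _ = _
        rw [pvCount_cons]
        rw [pvTri_floordiv]
        simp only [Nat.zero_add, Nat.add_zero]
        have : (pvTri 0 : Int) = 0 := rfl
        omega

theorem pvLoopP_eq_pvLoopD (L : List Int) : ∀ (x y dp res : Int),
    (pvLoopP x y dp res L).2 =
      pvLoopD (y - x) dp res (List.zipWith (fun a b => b - a) (y :: L) L) := by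
  induction L with
  | nil => intro x y dp res; simp [pvLoopP, pvLoopD]
  | cons z rest ih =>
      intro x y dp res
      simp only [pvLoopP, pvLoopD, List.zipWith_cons_cons]
      by_cases h : z - y = y - x
      · rw [if_pos h, if_pos h, ih]
      · rw [if_neg h, if_neg h, ih]

theorem pvFoldA (A : List Int) : ∀ (rest : List Int) (i : Nat) (x y dp res : Int),
    2 ≤ i → A.drop i = rest →
    PySem.List.pyGetD A ((i : Int) - 1) 0 = y →
    PySem.List.pyGetD A ((i : Int) - 2) 0 = x →
    ((PySem.List.pyRange (i : Int) (A.length : Int) 1).foldl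
      (fun (s : Int × Int) j =>
        if PySem.List.pyGetD A j 0 - PySem.List.pyGetD A (j - 1) 0 =
           PySem.List.pyGetD A (j - 1) 0 - PySem.List.pyGetD A (j - 2) 0
        then (s.1 + 1, s.2 + (s.1 + 1))
        else (0, s.2))
      (dp, res)) = pvLoopP x y dp res rest := by
  intro rest
  induction rest with
  | nil =>
      intro i x y dp res h2 hdrop hy hx
      have hlen : A.length ≤ i := List.drop_eq_nil_iff.mp hdrop
      rw [PySem.List.pyRange_one_eq_nil (by exact_mod_cast hlen)]
      rfl
  | cons z rest' ih =>
      intro i x y dp res h2 hdrop hy hx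
      have hi : i < A.length := by
        rcases Nat.lt_or_ge i A.length with h | h
        · exact h
        · rw [List.drop_eq_nil_of_le h] at hdrop
          exact absurd hdrop.symm (List.cons_ne_nil z rest')
      have hz : PySem.List.pyGetD A (i : Int) 0 = z := by
        have hh : (A.drop i).head? = some z := by rw [hdrop]; rfl
        rw [List.head?_drop] at hh
        rw [PySem.List.pyGetD_natCast]
        simp [List.getD, hh]
      have hdrop' : A.drop (i + 1) = rest' := by
        have : A.drop (i + 1) = (A.drop i).drop 1 := by
          rw [List.drop_drop]
        rw [this, hdrop]
        rfl
      have hcast1 : ((i + 1 : Nat) : Int) - 1 = (i : Int) := by push_cast; ring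
      have hcast2 : ((i + 1 : Nat) : Int) - 2 = (i : Int) - 1 := by push_cast; ring
      rw [PySem.List.pyRange_one_cons (by exact_mod_cast hi)]
      rw [List.foldl_cons]
      have hstep : ((i : Int) + 1) = ((i + 1 : Nat) : Int) := by push_cast; ring
      by_cases hcond : z - y = y - x
      · rw [if_pos (by rw [hz, hy, hx]; exact hcond)]
        rw [hstep, ih (i + 1) y z (dp + 1) (res + (dp + 1)) (by omega) hdrop'
          (by rw [hcast1]; exact hz) (by rw [hcast2]; exact hy)]
        simp [pvLoopP, if_pos hcond]
      · rw [if_neg (by rw [hz, hy, hx]; exact hcond)]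
        rw [hstep, ih (i + 1) y z 0 res (by omega) hdrop'
          (by rw [hcast1]; exact hz) (by rw [hcast2]; exact hy)]
        simp [pvLoopP, if_neg hcond]

-- ===== VERDICT (by name: the statement is the Claim_ definition above) =====
theorem numberOfArithmeticSlices2_spec : Claim_equal_numberOfArithmeticSlices2 := by
  intro A _
  unfold Spec_numberOfArithmeticSlices2
  match A with
  | [] =>
      show numberOfArithmeticSlices2 [] = numberOfArithmeticSlices2_alt []
      unfold numberOfArithmeticSlices2 numberOfArithmeticSlices2_alt
      rw [show List.zipWith (fun a b => b - a) ([] : List Int)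
            (PySem.List.slice [] (some 1) none) = [] from rfl, pvCount_nil]
      rw [show (([] : List Int).length : Int) = 0 from rfl,
        PySem.List.pyRange_one_eq_nil (by norm_num)]
      rfl
  | [a] =>
      show numberOfArithmeticSlices2 [a] = numberOfArithmeticSlices2_alt [a]
      unfold numberOfArithmeticSlices2 numberOfArithmeticSlices2_alt
      rw [show List.zipWith (fun a b => b - a) [a]
            (PySem.List.slice [a] (some 1) none) = [] from rfl, pvCount_nil]
      rw [show (([a] : List Int).length : Int) = 1 from rfl,
        PySem.List.pyRange_one_eq_nil (by norm_num)]
      rfl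
  | a :: b :: rest =>
      unfold numberOfArithmeticSlices2 numberOfArithmeticSlices2_alt
      have hy : PySem.List.pyGetD (a :: b :: rest) (((2 : Nat) : Int) - 1) 0 = b := by
        norm_num [PySem.List.pyGetD]
      have hx : PySem.List.pyGetD (a :: b :: rest) (((2 : Nat) : Int) - 2) 0 = a := by
        norm_num [PySem.List.pyGetD]
      have hA := pvFoldA (a :: b :: rest) rest 2 a b 0 0 (by omega) rfl hy hx
      rw [show ((2 : Nat) : Int) = (2 : Int) from rfl] at hA
      rw [hA, pvLoopP_eq_pvLoopD]
      rw [show (0 : Int) = ((0 : Nat) : Int) from rfl, pvLoopD_eq]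
      rw [PySem.List.slice_from_one]
      simp only [List.tail_cons, List.zipWith_cons_cons]
      rw [pvCount_cons]
      rw [pvTri_floordiv]
      simp only [Nat.zero_add]
      have : (pvTri 0 : Int) = 0 := rfl
      omega
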